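-- pv_equiv track=rewrite | github.com/PhilGrunewald/dot_files | python/mdFilter.py | de_intent
-- ===== SOURCE A (Python) =====
-- def de_intent(lines):
--     """ add heading markers to lines that are single indent """
--     level_change = False
--     level = -1
--     ref_line = 0
--     for n,line in enumerate(lines):
--         if line != "\n" and not line.startswith('  -'):
--             last_level = level
--             level = 1+int((len(line)-len(line.lstrip(' ')))/2)
--             if level != last_level:
--                 if level_change:
--                     heading = "#"*last_level
--                     lines[ref_line] = f"\n{heading} {lines[ref_line].strip()}\n\n"
--                 else:
--                     lines[ref_line] = f"{lines[ref_line].strip()}\n"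
--                 level_change = True
--             else:
--                 # if n > 0:
--                 lines[ref_line] = f"{lines[ref_line].strip()}\n"
--                 level_change = False
--             ref_line = n
--
--     return lines
-- ===== SOURCE B (Python) =====
-- def de_intent(lines):
--     """ add heading markers to lines that are single indent """
--     # (index, indent-level) of every qualifying line, computed up front
--     quals = [(i, 1 + (len(l) - len(l.lstrip(' '))) // 2)
--              for i, l in enumerate(lines)
--              if l != "\n" and not l.startswith('  -')]
--     if not quals:
--         return lines
--     lines[0] = lines[0].strip() + "\n"
--     prev_changed = True  # the first qualifying level always differs from the virtual initial level -1
--     for (i, lvl), (_, nxt) in zip(quals, quals[1:]):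
--         changed = nxt != lvl
--         if prev_changed and changed:
--             lines[i] = "\n" + "#" * lvl + " " + lines[i].strip() + "\n\n"
--         else:
--             lines[i] = lines[i].strip() + "\n"
--         prev_changed = changed
--     return lines
-- ===== Notes on version B (the rewrite author's own statement) =====
-- stated objective: alternative
-- what changed: A's single stateful loop with a lagging ref_line, a level_change flag and an incrementally updated level is replaced by a two-pass decomposition: first collect (index, indent-level) of every qualifying line, then walk adjacent pairs of that list rewriting each qualifying line except the last (heading iff both the step into and out of it change level), after unconditionally stripping line 0.
import Mathlib
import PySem

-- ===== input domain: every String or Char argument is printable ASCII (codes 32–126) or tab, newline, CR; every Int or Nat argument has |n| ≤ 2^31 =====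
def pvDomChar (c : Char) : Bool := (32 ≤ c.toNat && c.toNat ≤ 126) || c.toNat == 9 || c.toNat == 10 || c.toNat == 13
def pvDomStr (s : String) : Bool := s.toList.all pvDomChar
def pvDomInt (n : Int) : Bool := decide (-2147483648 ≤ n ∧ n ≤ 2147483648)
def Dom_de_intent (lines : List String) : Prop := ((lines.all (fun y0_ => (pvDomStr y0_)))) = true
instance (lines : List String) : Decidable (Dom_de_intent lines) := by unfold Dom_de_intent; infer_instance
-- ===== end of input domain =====

-- B replaces A's single stateful loop (lagging ref_line + level_change flag) by a two-pass
-- decomposition: collect (index, level) of qualifying lines, then rewrite adjacent pairs.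
-- A mutates its argument list in place; the equivalence proved here is about the RETURN value only.


-- ===== PORT A =====
-- shared expression helpers (both Pythons compute these very expressions)
-- line != "\n" and not line.startswith('  -')
def pvQual (line : String) : Bool := line != "\n" && !(PySem.Str.startswith line "  -")
-- 1 + int((len(line) - len(line.lstrip(' '))) / 2) ; lstrip(' ') ported by hand as
-- dropWhile (· == ' ') — exact: it drops exactly the leading spaces; int(x/2) is truncdiv
def pvLevel (line : String) : Int :=
  1 + PySem.Int.truncdiv ((PySem.Str.len line : Int) -
        (PySem.Chars.len (line.toList.dropWhile (fun c => c == ' ')) : Int)) 2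
-- f"{s.strip()}\n"
def pvStrip (s : String) : String := PySem.Str.strip s ++ "\n"
-- f"\n{'#'*lvl} {s.strip()}\n\n"
def pvHeading (lvl : Int) (s : String) : String :=
  "\n" ++ String.ofList (List.replicate lvl.toNat '#') ++ " " ++ PySem.Str.strip s ++ "\n\n"

-- one iteration of A's loop; state = (level_change, level, ref_line, lines)
def pvAStep (st : Bool × Int × Int × List String) (p : Int × String) : Bool × Int × Int × List String :=
  let (lc, level, ref, acc) := st
  if pvQual p.2 then
    let lastLevel := level
    let lvl := pvLevel p.2
    if lvl ≠ lastLevel then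
      if lc then
        (true, lvl, p.1, PySem.List.pySetD acc ref (pvHeading lastLevel (PySem.List.pyGetD acc ref "")))
      else
        (true, lvl, p.1, PySem.List.pySetD acc ref (pvStrip (PySem.List.pyGetD acc ref "")))
    else
      (false, lvl, p.1, PySem.List.pySetD acc ref (pvStrip (PySem.List.pyGetD acc ref "")))
  else st

-- Python iterates the live list, but every write targets an already-consumed index
-- (ref_line < n, or 0 ≤ n), so enumerating the original list is exact
def de_intent (lines : List String) : List String :=
  ((PySem.List.enumerate lines).foldl pvAStep (false, -1, 0, lines)).2.2.2

-- ===== PORT B =====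
-- one iteration of B's pair loop; state = (prev_changed, lines)
def pvBStep (st : Bool × List String) (pr : (Int × Int) × (Int × Int)) : Bool × List String :=
  let (i, lvl) := pr.1
  let nxt := pr.2.2
  let changed := nxt != lvl
  ( changed,
    PySem.List.pySetD st.2 i
      (if st.1 && changed then pvHeading lvl (PySem.List.pyGetD st.2 i "")
       else pvStrip (PySem.List.pyGetD st.2 i "")) )

def de_intent_alt (lines : List String) : List String :=
  let quals : List (Int × Int) :=
    (PySem.List.enumerate lines).filterMap
      (fun p => if pvQual p.2 then some (p.1, pvLevel p.2) else none)
  if quals.isEmpty then lines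
  else
    let lines1 := PySem.List.pySetD lines 0 (pvStrip (PySem.List.pyGetD lines 0 ""))
    ((quals.zip quals.tail).foldl pvBStep (true, lines1)).2

-- ===== PRECONDITION & SPEC =====
def Spec_de_intent (lines : List String) (out : List String) : Prop := out = de_intent_alt lines
instance (lines : List String) (out : List String) : Decidable (Spec_de_intent lines out) := by unfold Spec_de_intent; infer_instance

-- ===== CLAIM (what is proved, stated in full; the proofs are below) =====
def Claim_equal_de_intent : Prop := ∀ (lines : List String), Dom_de_intent lines → Spec_de_intent lines (de_intent lines)

-- ===== LEMMAS AND PROOFS =====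

-- the map applied to a qualifying enumerate entry
def pvH (p : Int × String) : Int × Int := (p.1, pvLevel p.2)

lemma pv_foldl_filter (xs : List (Int × String)) :
    ∀ (st : Bool × Int × Int × List String),
      xs.foldl pvAStep st = (xs.filter (fun p => pvQual p.2)).foldl pvAStep st := by
  induction xs with
  | nil => intro st; rfl
  | cons x xs ih =>
    intro st
    by_cases h : pvQual x.2
    · simp [h, List.foldl_cons, ih]
    · simp only [Bool.not_eq_true] at h
      have hx : pvAStep st x = st := by
        simp [pvAStep, h]
      simp [h, List.foldl_cons, hx, ih]

lemma pv_filterMap_eq (xs : List (Int × String)) :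
    xs.filterMap (fun p => if pvQual p.2 then some (p.1, pvLevel p.2) else none)
      = (xs.filter (fun p => pvQual p.2)).map pvH := by
  induction xs with
  | nil => rfl
  | cons x xs ih =>
    by_cases h : pvQual x.2 <;>
      simp [h, ih, pvH]

lemma pvLevel_ne_neg_one (s : String) : pvLevel s ≠ -1 := by
  have hle : (s.toList.dropWhile (fun c => c == ' ')).length ≤ s.toList.length :=
    List.length_dropWhile_le _ _
  have h0 : (0 : Int) ≤ (PySem.Str.len s : Int) -
      (PySem.Chars.len (s.toList.dropWhile (fun c => c == ' ')) : Int) := by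
    simp only [PySem.Str.len_eq, PySem.Chars.len_eq]
    omega
  unfold pvLevel PySem.Int.truncdiv
  have h2 : (0:Int) ≤ ((PySem.Str.len s : Int) -
      (PySem.Chars.len (s.toList.dropWhile (fun c => c == ' ')) : Int)).tdiv 2 :=
    Int.tdiv_nonneg h0 (by norm_num)
  omega

-- core: A's remaining loop (previous qualifying entry q already absorbed into the state)
-- computes exactly B's pair loop
lemma pv_core (rest : List (Int × String)) :
    ∀ (lc : Bool) (q : Int × Int) (acc : List String),
      (∀ p ∈ rest, pvQual p.2 = true) →
      (rest.foldl pvAStep (lc, q.2, q.1, acc)).2.2.2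
        = (((q :: rest.map pvH).zip (rest.map pvH)).foldl pvBStep (lc, acc)).2 := by
  induction rest with
  | nil => intro lc q acc _; rfl
  | cons x rest ih =>
    intro lc q acc hq
    have hx : pvQual x.2 = true := hq x (List.mem_cons_self ..)
    have hrest : ∀ p ∈ rest, pvQual p.2 = true := fun p hp => hq p (List.mem_cons_of_mem _ hp)
    have hstep : pvAStep (lc, q.2, q.1, acc) x
        = ((pvLevel x.2 != q.2),
           pvLevel x.2, x.1,
           (pvBStep (lc, acc) (q, pvH x)).2) := by
      by_cases hc : pvLevel x.2 = q.2
      · simp [pvAStep, pvBStep, pvH, hx, hc]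
      · have hne : (pvLevel x.2 != q.2) = true := by simp [hc]
        cases lc <;> simp [pvAStep, pvBStep, pvH, hx, hc, hne]
    have hfst : (pvBStep (lc, acc) (q, pvH x)).1 = (pvLevel x.2 != q.2) := by
      simp [pvBStep, pvH]
    calc ((x :: rest).foldl pvAStep (lc, q.2, q.1, acc)).2.2.2
        = (rest.foldl pvAStep ((pvLevel x.2 != q.2), pvLevel x.2, x.1,
            (pvBStep (lc, acc) (q, pvH x)).2)).2.2.2 := by rw [List.foldl_cons, hstep]
      _ = (((pvH x :: rest.map pvH).zip (rest.map pvH)).foldl pvBStep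
            ((pvLevel x.2 != q.2), (pvBStep (lc, acc) (q, pvH x)).2)).2 := by
            exact ih _ (pvH x) _ hrest
      _ = (((q :: pvH x :: rest.map pvH).zip (pvH x :: rest.map pvH)).foldl pvBStep (lc, acc)).2 := by
            rw [List.zip_cons_cons, List.foldl_cons, ← hfst]

-- ===== VERDICT (by name: the statement is the Claim_ definition above) =====
theorem de_intent_spec : Claim_equal_de_intent := by
  intro lines _
  unfold Spec_de_intent de_intent de_intent_alt
  rw [pv_foldl_filter, pv_filterMap_eq]
  set F := (PySem.List.enumerate lines).filter (fun p => pvQual p.2) with hF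
  have hqualF : ∀ p ∈ F, pvQual p.2 = true := by
    intro p hp
    rw [hF] at hp
    exact (List.mem_filter.mp hp).2
  cases hFe : F with
  | nil => simp
  | cons f0 F' =>
    have hq0 : pvQual f0.2 = true := hqualF f0 (hFe ▸ List.mem_cons_self ..)
    have hqF' : ∀ p ∈ F', pvQual p.2 = true := fun p hp => hqualF p (hFe ▸ List.mem_cons_of_mem _ hp)
    have hne : pvLevel f0.2 ≠ (-1 : Int) := pvLevel_ne_neg_one _
    have hstep0 : pvAStep (false, -1, 0, lines) f0
        = (true, pvLevel f0.2, f0.1,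
            PySem.List.pySetD lines 0 (pvStrip (PySem.List.pyGetD lines 0 ""))) := by
      simp [pvAStep, hq0, hne]
    rw [List.foldl_cons, hstep0]
    have := pv_core F' true (pvH f0)
      (PySem.List.pySetD lines 0 (pvStrip (PySem.List.pyGetD lines 0 ""))) hqF'
    simp only [pvH] at this
    simp [this, pvH]
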